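-- pv_equiv track=rewrite | github.com/mohammadfaiizan/ProjectI | DSA/Theory/Dynamic_Programming/012_dp_game_theory.py | nim_game_kayles
-- ===== SOURCE A (Python) =====
-- def nim_game_kayles(pins: int) -> bool:
--     """
--     Kayles - Bowling pin game variant of Nim
--
--     Time Complexity: O(n)
--     Space Complexity: O(n)
--
--     Args:
--         pins: Number of pins in a row
--
--     Returns:
--         True if first player can win
--     """
--     if pins <= 0:
--         return False
--
--     # DP to compute Grundy numbers
--     grundy = [0] * (pins + 1)
--
--     for i in range(1, pins + 1):
--         moves = set()
--
--         # Remove one pin: split into two parts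
--         for j in range(i):
--             left = j
--             right = i - j - 1
--             moves.add(grundy[left] ^ grundy[right])
--
--         # Remove two adjacent pins: split into two parts
--         for j in range(i - 1):
--             left = j
--             right = i - j - 2
--             moves.add(grundy[left] ^ grundy[right])
--
--         # Find mex (minimum excludant)
--         mex = 0
--         while mex in moves:
--             mex += 1
--
--         grundy[i] = mex
--
--     return grundy[pins] != 0
-- ===== SOURCE B (Python) =====
-- def nim_game_kayles(pins: int) -> bool:
--     # In Kayles the first player always wins on a nonempty row: removing the
--     # central pin (odd n) or the central two pins (even n) leaves two equal
--     # rows, whose Grundy values XOR to 0, so the Grundy value of n >= 1 pins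
--     # is never 0.  Hence the answer is simply pins > 0.
--     return pins > 0
-- ===== Notes on version B (the rewrite author's own statement) =====
-- stated objective: faster
-- what changed: Replaced the O(n^2) Grundy-number DP by the closed-form fact that the Kayles Grundy value of n pins is nonzero for every n >= 1 (the central-removal move leaves two equal rows with XOR 0), so the function is just pins > 0.
import Mathlib
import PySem

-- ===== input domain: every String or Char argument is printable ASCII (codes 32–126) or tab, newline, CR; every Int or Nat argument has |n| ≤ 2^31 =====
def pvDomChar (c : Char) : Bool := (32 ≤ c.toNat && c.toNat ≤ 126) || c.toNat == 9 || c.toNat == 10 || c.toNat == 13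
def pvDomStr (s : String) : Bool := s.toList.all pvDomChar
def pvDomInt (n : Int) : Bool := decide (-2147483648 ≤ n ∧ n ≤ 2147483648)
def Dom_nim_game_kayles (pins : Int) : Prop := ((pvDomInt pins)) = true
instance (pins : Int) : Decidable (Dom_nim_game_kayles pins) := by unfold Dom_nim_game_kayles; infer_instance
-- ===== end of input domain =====

-- B replaces A's O(n^2) Grundy DP by the fact that the Kayles Grundy value is nonzero for every n ≥ 1
-- (central removal leaves two equal rows), so the answer is just pins > 0.

-- ===== PORT A =====
-- 'while mex in moves: mex += 1' — fuel = |moves| + 1 always suffices (mex visits distinct values)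
def kaylesMex (moves : PySem.Set Nat) : Nat → Nat → Nat
  | 0, mex => mex
  | fuel + 1, mex => if PySem.Set.contains moves mex then kaylesMex moves fuel (mex + 1) else mex

-- the body of A's 'for i in range(1, pins+1)' loop
def kaylesStep (g : Array Nat) (i : Nat) : Array Nat :=
  let m1 := (List.range i).foldl
      (fun m j => PySem.Set.add m ((g.getD j 0) ^^^ (g.getD (i - j - 1) 0))) PySem.Set.empty
  let m2 := (List.range (i - 1)).foldl
      (fun m j => PySem.Set.add m ((g.getD j 0) ^^^ (g.getD (i - j - 2) 0))) m1
  g.set! i (kaylesMex m2 (m2.length + 1) 0)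

def nim_game_kayles (pins : Int) : Bool :=
  if pins ≤ 0 then false
  else
    let n := pins.toNat
    let g := (List.range' 1 n).foldl kaylesStep (Array.replicate (n + 1) 0)
    g.getD n 0 != 0

-- ===== PORT B =====
def nim_game_kayles_alt (pins : Int) : Bool := decide (pins > 0)

-- ===== PRECONDITION & SPEC =====
def Spec_nim_game_kayles (pins : Int) (out : Bool) : Prop := out = nim_game_kayles_alt pins
instance (pins : Int) (out : Bool) : Decidable (Spec_nim_game_kayles pins out) := by unfold Spec_nim_game_kayles; infer_instance

-- ===== CLAIM (what is proved, stated in full; the proofs are below) =====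
def Claim_equal_nim_game_kayles : Prop := ∀ (pins : Int), Dom_nim_game_kayles pins → Spec_nim_game_kayles pins (nim_game_kayles pins)

-- ===== LEMMAS AND PROOFS =====

theorem kaylesMex_ge (moves : PySem.Set Nat) (fuel mex : Nat) : mex ≤ kaylesMex moves fuel mex := by
  induction fuel generalizing mex with
  | zero => simp [kaylesMex]
  | succ f ih =>
    simp only [kaylesMex]
    split
    · exact le_trans (by omega) (ih (mex + 1))
    · exact le_refl _

theorem kaylesMex_ne_zero (moves : PySem.Set Nat) (fuel : Nat)
    (h : PySem.Set.contains moves 0 = true) : kaylesMex moves (fuel + 1) 0 ≠ 0 := by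
  simp only [kaylesMex, h, if_true, Nat.zero_add]
  have := kaylesMex_ge moves fuel 1
  omega

theorem mem_foldl_add_of_mem {β : Type} (f : β → Nat) (x : Nat) (l : List β) (s : PySem.Set Nat)
    (h : x ∈ s) : x ∈ l.foldl (fun m j => PySem.Set.add m (f j)) s := by
  induction l generalizing s with
  | nil => exact h
  | cons a t ih =>
    apply ih
    simp [PySem.Set.mem_add, h]

theorem mem_foldl_add_of_apply {β : Type} (f : β → Nat) (x : Nat) (l : List β) (s : PySem.Set Nat)
    (j : β) (hj : j ∈ l) (hx : f j = x) : x ∈ l.foldl (fun m j => PySem.Set.add m (f j)) s := by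
  induction l generalizing s with
  | nil => cases hj
  | cons a t ih =>
    rcases List.mem_cons.mp hj with h | h
    · subst h
      exact mem_foldl_add_of_mem f x t _ (by simp [PySem.Set.mem_add, hx])
    · exact ih _ h

-- the move set of row i contains 0 (remove the central pin / central two pins)
theorem zero_mem_moves (g : Array Nat) (i : Nat) (hi : 1 ≤ i) :
    0 ∈ (List.range (i - 1)).foldl
        (fun m j => PySem.Set.add m ((g.getD j 0) ^^^ (g.getD (i - j - 2) 0)))
        ((List.range i).foldl
          (fun m j => PySem.Set.add m ((g.getD j 0) ^^^ (g.getD (i - j - 1) 0))) PySem.Set.empty) := by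
  rcases Nat.even_or_odd i with he | ho
  · -- i even, i ≥ 2: remove the two central pins, j = (i-2)/2, so i - j - 2 = j
    obtain ⟨k, hk⟩ := he
    apply mem_foldl_add_of_apply _ _ _ _ (k - 1)
    · exact List.mem_range.mpr (by omega)
    · have : i - (k - 1) - 2 = k - 1 := by omega
      rw [this, Nat.xor_self]
  · -- i odd: remove the central pin, j = (i-1)/2, so i - j - 1 = j
    obtain ⟨k, hk⟩ := ho
    apply mem_foldl_add_of_mem
    apply mem_foldl_add_of_apply _ _ _ _ k
    · exact List.mem_range.mpr (by omega)
    · have : i - k - 1 = k := by omega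
      rw [this, Nat.xor_self]

theorem kaylesStep_size (g : Array Nat) (i : Nat) : (kaylesStep g i).size = g.size := by
  simp [kaylesStep]

theorem foldl_kaylesStep_size (l : List Nat) (g : Array Nat) :
    (l.foldl kaylesStep g).size = g.size := by
  induction l generalizing g with
  | nil => rfl
  | cons a t ih => simp [List.foldl_cons, ih, kaylesStep_size]

theorem set_getD_mex (g : Array Nat) (i : Nat) (hlt : i < g.size) (moves : PySem.Set Nat)
    (hc : PySem.Set.contains moves 0 = true) (fuel : Nat) :
    (g.set! i (kaylesMex moves (fuel + 1) 0)).getD i 0 ≠ 0 := by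
  rw [Array.getD, dif_pos (by simpa using hlt)]
  have hsz : i < (g.setIfInBounds i (kaylesMex moves (fuel + 1) 0)).size := by simpa using hlt
  show (g.setIfInBounds i (kaylesMex moves (fuel + 1) 0))[i]'hsz ≠ 0
  rw [Array.getElem_setIfInBounds_self]
  exact kaylesMex_ne_zero _ _ hc

theorem kaylesStep_getD_self (g : Array Nat) (i : Nat) (hlt : i < g.size) (hi : 1 ≤ i) :
    (kaylesStep g i).getD i 0 ≠ 0 := by
  have hc : PySem.Set.contains
      ((List.range (i - 1)).foldl
        (fun m j => PySem.Set.add m ((g.getD j 0) ^^^ (g.getD (i - j - 2) 0)))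
        ((List.range i).foldl
          (fun m j => PySem.Set.add m ((g.getD j 0) ^^^ (g.getD (i - j - 1) 0))) PySem.Set.empty))
      0 = true := by simpa [PySem.Set.contains] using zero_mem_moves g i hi
  exact set_getD_mex g i hlt _ hc _

theorem nim_game_kayles_spec_aux (pins : Int) (hp : ¬ pins ≤ 0) :
    nim_game_kayles pins = true := by
  have hn : 1 ≤ pins.toNat := by omega
  unfold nim_game_kayles
  rw [if_neg hp]
  show (((List.range' 1 pins.toNat).foldl kaylesStep (Array.replicate (pins.toNat + 1) 0)).getD pins.toNat 0 != 0) = true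
  generalize hndef : pins.toNat = n at hn ⊢
  have hsplit : List.range' 1 n = List.range' 1 (n - 1) ++ [n] := by
    have : n = (n - 1) + 1 := by omega
    rw [this, List.range'_concat]
    simp
    omega
  rw [hsplit, List.foldl_append, List.foldl_cons, List.foldl_nil]
  have hsz : ((List.range' 1 (n - 1)).foldl kaylesStep (Array.replicate (n + 1) 0)).size = n + 1 := by
    rw [foldl_kaylesStep_size]; simp
  have := kaylesStep_getD_self ((List.range' 1 (n - 1)).foldl kaylesStep (Array.replicate (n + 1) 0))
      n (by omega) hn
  simpa using this

-- ===== VERDICT (by name: the statement is the Claim_ definition above) =====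
theorem nim_game_kayles_spec : Claim_equal_nim_game_kayles := by
  intro pins _
  unfold Spec_nim_game_kayles nim_game_kayles_alt
  by_cases hp : pins ≤ 0
  · simp [nim_game_kayles, hp]
  · rw [nim_game_kayles_spec_aux pins hp]
    have h0 : (0:Int) < pins := by omega
    simp [h0]
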